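-- pv_equiv track=rewrite | github.com/austral-prog/tp-7-amielpoletti-1 | loops_and_print.py | enumerate_list
-- ===== SOURCE A (Python) =====
-- def enumerate_list(lista):
--     enumerated_list = []
--     index = 0
--
--     for value in lista:
--         if value != "":
--             enumerated_list.append(f"{index}. {value}")
--             index += 1
--
--     return enumerated_list
-- ===== SOURCE B (Python) =====
-- def enumerate_list(lista):
--     # Counter-free formulation: each kept item's index is the number of
--     # non-empty strings strictly before it in the original list.
--     return [f"{sum(1 for u in lista[:j] if u != '')}. {v}"
--             for j, v in enumerate(lista) if v != ""]
-- ===== Notes on version B (the rewrite author's own statement) =====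
-- stated objective: alternative
-- what changed: Eliminates A's hand-maintained running counter and accumulator entirely: B computes each kept item's index independently as the count of non-empty strings in its strict prefix (a nested prefix scan), trading A's stateful O(n) single pass for a stateless O(n^2) per-element formulation.
import Mathlib
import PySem

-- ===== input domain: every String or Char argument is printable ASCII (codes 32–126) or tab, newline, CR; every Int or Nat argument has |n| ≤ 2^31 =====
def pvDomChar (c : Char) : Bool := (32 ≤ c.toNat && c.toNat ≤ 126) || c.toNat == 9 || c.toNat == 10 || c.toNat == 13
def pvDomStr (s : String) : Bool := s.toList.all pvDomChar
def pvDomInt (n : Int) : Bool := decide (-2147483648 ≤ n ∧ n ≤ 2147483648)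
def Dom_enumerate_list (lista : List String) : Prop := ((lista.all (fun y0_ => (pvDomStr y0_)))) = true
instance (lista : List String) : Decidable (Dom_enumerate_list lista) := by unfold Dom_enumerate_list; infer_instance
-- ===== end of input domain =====

-- B drops A's running counter and accumulator: each kept item's index is computed
-- independently as the count of non-empty strings in its strict prefix (alternative, not faster).

-- ===== PORT A =====
-- Port of A: one pass, appending with a hand-maintained counter carried in the fold state.
def enumerate_list (lista : List String) : List String :=
  (lista.foldl
    (fun st value =>
      if value ≠ "" then (st.1 ++ [PySem.Int.toStr st.2 ++ ". " ++ value], st.2 + 1)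
      else st)
    (([] : List String), (0 : Int))).1

-- ===== PORT B =====
-- Port of B: comprehension over enumerate(lista), keeping non-empty v, and computing the
-- index as sum(1 for u in lista[:j] if u != '') — a prefix slice counted per element.
def enumerate_list_alt (lista : List String) : List String :=
  ((PySem.List.enumerate lista 0).filter (fun p => p.2 ≠ "")).map
    (fun p =>
      PySem.Int.toStr
        (((PySem.List.slice lista none (some p.1)).countP (fun u => u ≠ "") : Int))
        ++ ". " ++ p.2)

-- ===== PRECONDITION & SPEC =====
def Spec_enumerate_list (lista : List String) (out : List String) : Prop := out = enumerate_list_alt lista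
instance (lista : List String) (out : List String) : Decidable (Spec_enumerate_list lista out) := by unfold Spec_enumerate_list; infer_instance

-- ===== CLAIM (what is proved, stated in full; the proofs are below) =====
def Claim_equal_enumerate_list : Prop := ∀ (lista : List String), Dom_enumerate_list lista → Spec_enumerate_list lista (enumerate_list lista)

-- ===== LEMMAS AND PROOFS =====

-- Loop invariant: A's fold from state (acc, n) yields acc ++ the enumerate-formatted filtered tail starting at n.
theorem enumerate_list_fold (lista : List String) (acc : List String) (n : Int) :
    (lista.foldl
      (fun st value =>
        if value ≠ "" then (st.1 ++ [PySem.Int.toStr st.2 ++ ". " ++ value], st.2 + 1)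
        else st)
      (acc, n)) =
    (acc ++ (PySem.List.enumerate (lista.filter (fun v => v ≠ "")) n).map
        (fun p => PySem.Int.toStr p.1 ++ ". " ++ p.2),
      n + (lista.filter (fun v => v ≠ "")).length) := by
  induction lista generalizing acc n with
  | nil => simp
  | cons x xs ih =>
    simp only [List.foldl_cons, List.filter_cons]
    by_cases hx : x = ""
    · rw [if_neg (by simp [hx]), ih]
      simp [hx]
    · rw [if_pos hx, ih]
      simp [hx, PySem.List.enumerate_cons]
      omega

-- B's prefix-count index equals the rank of the kept element: for any already-seen prefix `pre`,
-- filtering enumerate(xs, |pre|) and counting the prefix of pre ++ xs equals enumerating the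
-- filtered tail starting at countP pre.
theorem enumerate_list_prefix (xs pre : List String) :
    ((PySem.List.enumerate xs (pre.length : Int)).filter (fun p => p.2 ≠ "")).map
      (fun p =>
        PySem.Int.toStr
          (((PySem.List.slice (pre ++ xs) none (some p.1)).countP (fun u => u ≠ "") : Int))
          ++ ". " ++ p.2) =
    (PySem.List.enumerate (xs.filter (fun v => v ≠ ""))
        ((pre.countP (fun u => u ≠ "") : Int))).map
      (fun p => PySem.Int.toStr p.1 ++ ". " ++ p.2) := by
  induction xs generalizing pre with
  | nil => simp [PySem.List.enumerate_nil]
  | cons x xs ih =>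
    have hlen : ((pre.length : Int) + 1) = ((pre ++ [x]).length : Int) := by
      simp
    have happ : pre ++ x :: xs = (pre ++ [x]) ++ xs := by simp
    have hslice : PySem.List.slice (pre ++ x :: xs) none (some (pre.length : Int)) = pre := by
      rw [PySem.List.slice_to_natCast]; simp
    by_cases hx : x = ""
    · simp only [PySem.List.enumerate_cons, List.filter_cons]
      rw [if_neg (by simp [hx])]
      rw [hlen, happ, ih (pre ++ [x])]
      simp [hx]
    · simp only [PySem.List.enumerate_cons, List.filter_cons]
      rw [if_pos (by simp [hx]), if_pos (by simp [hx])]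
      simp only [List.map_cons]
      rw [hslice, hlen, happ, ih (pre ++ [x])]
      have : (pre ++ [x]).countP (fun u => decide (u ≠ "")) = pre.countP (fun u => decide (u ≠ "")) + 1 := by
        simp [List.countP_append, hx]
      rw [this, PySem.List.enumerate_cons]
      simp

-- ===== VERDICT (by name: the statement is the Claim_ definition above) =====
theorem enumerate_list_spec : Claim_equal_enumerate_list := by
  intro lista _
  unfold Spec_enumerate_list enumerate_list enumerate_list_alt
  rw [enumerate_list_fold]
  have h := enumerate_list_prefix lista []
  simpa using h.symm
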